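-- pv_equiv track=rewrite | github.com/vz415/lfiax | bmp_simulator/promisys/bmp_util.py | make_reactions_onestep_hexameric
-- ===== SOURCE A (Python) =====
-- def make_reactions_onestep_hexameric(model_size=(2, 2, 2)):
--     '''
--     Define reactions for a one-step hexameric model.
--
--     Parameters
--     ----------
--     model_size: tuple of ints, shape (3, )
--         Specification of model parameters, given as (nL, nA, nB) or
--         (number of ligands, number of type I receptors, number of type II
--         receptors). Default is (2, 2, 2).
--
--     Outputs
--     -------
--     reactions: string
--         Set of reactions for specified numbers of ligands and receptors, one
--         per line.
--     '''
--     nL, nA, nB = model_size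
--     reactions = ''
--
--     # Enumerate all possible hexameric signaling complexes
--     for i1 in range(nL):
--         for i2 in range(i1, nL):
--             for j1 in range(nA):
--                 for j2 in range(j1, nA):
--                     for k1 in range(nB):
--                         for k2 in range(k1, nB):
--                             reactions += f'L_{i1+1} + L_{i2+1} + ' + \
--                                 f'A_{j1+1} + A_{j2+1} + ' + \
--                                 f'B_{k1+1} + B_{k2+1} <=> ' + \
--                                 f'H_{i1+1}_{i2+1}_{j1+1}_{j2+1}_{k1+1}_{k2+1}\n'
--
--     return reactions
-- ===== SOURCE B (Python) =====
-- import math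
--
--
-- def make_reactions_onestep_hexameric(model_size=(2, 2, 2)):
--     nL, nA, nB = model_size
--     if nL <= 0 or nA <= 0 or nB <= 0:
--         return ''
--     tL = nL * (nL + 1) // 2
--     tA = nA * (nA + 1) // 2
--     tB = nB * (nB + 1) // 2
--
--     def unrank(n, t, r):
--         # pair (a, b) with 0 <= a <= b < n at position r of the lexicographic
--         # enumeration of all such pairs, decoded arithmetically: the reverse
--         # rank rp falls in the triangular-number block of the pair's group.
--         rp = t - 1 - r
--         g = (math.isqrt(8 * rp + 1) - 1) // 2
--         off = rp - g * (g + 1) // 2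
--         return n - 1 - g, n - 1 - off
--
--     out = []
--     for m in range(tL * tA * tB):
--         i1, i2 = unrank(nL, tL, m // (tA * tB))
--         j1, j2 = unrank(nA, tA, m // tB % tA)
--         k1, k2 = unrank(nB, tB, m % tB)
--         out.append(f'L_{i1+1} + L_{i2+1} + A_{j1+1} + A_{j2+1} + '
--                    f'B_{k1+1} + B_{k2+1} <=> '
--                    f'H_{i1+1}_{i2+1}_{j1+1}_{j2+1}_{k1+1}_{k2+1}\n')
--     return ''.join(out)
-- ===== Notes on version B (the rewrite author's own statement) =====
-- stated objective: alternative
-- what changed: Replaces the six nested enumeration loops by a single flat loop over a line index m in range(T(nL)*T(nA)*T(nB)) that decodes each index arithmetically (divmod plus triangular-number unranking with isqrt) into the three ordered pairs before formatting, joining the lines once.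
import Mathlib
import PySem

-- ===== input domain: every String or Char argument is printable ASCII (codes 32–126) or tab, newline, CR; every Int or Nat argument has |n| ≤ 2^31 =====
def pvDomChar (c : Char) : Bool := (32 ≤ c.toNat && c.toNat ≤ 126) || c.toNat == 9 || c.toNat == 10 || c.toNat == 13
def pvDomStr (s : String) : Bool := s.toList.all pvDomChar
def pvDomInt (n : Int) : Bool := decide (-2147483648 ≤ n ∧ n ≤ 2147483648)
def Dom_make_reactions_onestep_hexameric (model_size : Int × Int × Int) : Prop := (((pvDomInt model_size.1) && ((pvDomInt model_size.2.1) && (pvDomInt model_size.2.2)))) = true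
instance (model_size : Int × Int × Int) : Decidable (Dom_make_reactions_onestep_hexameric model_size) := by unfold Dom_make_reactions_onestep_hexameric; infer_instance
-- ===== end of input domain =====

-- B replaces A's six nested enumeration loops by ONE flat loop over a line index that is decoded
-- arithmetically (divmod + triangular-number unranking via isqrt) into the three ordered pairs
-- (objective: alternative; same output, same asymptotic cost).

-- ===== PORT A =====
-- the f-string body of A's innermost loop
def pvLineA (i1 i2 j1 j2 k1 k2 : Int) : String :=
  "L_" ++ PySem.Int.toStr (i1+1) ++ " + L_" ++ PySem.Int.toStr (i2+1) ++ " + " ++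
  ("A_" ++ PySem.Int.toStr (j1+1) ++ " + A_" ++ PySem.Int.toStr (j2+1) ++ " + ") ++
  ("B_" ++ PySem.Int.toStr (k1+1) ++ " + B_" ++ PySem.Int.toStr (k2+1) ++ " <=> ") ++
  ("H_" ++ PySem.Int.toStr (i1+1) ++ "_" ++ PySem.Int.toStr (i2+1) ++ "_" ++ PySem.Int.toStr (j1+1)
    ++ "_" ++ PySem.Int.toStr (j2+1) ++ "_" ++ PySem.Int.toStr (k1+1) ++ "_" ++ PySem.Int.toStr (k2+1) ++ "\n")

def make_reactions_onestep_hexameric (model_size : Int × Int × Int) : String :=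
  let nL := model_size.1
  let nA := model_size.2.1
  let nB := model_size.2.2
  (PySem.List.pyRange 0 nL 1).foldl (fun reactions i1 =>
    (PySem.List.pyRange i1 nL 1).foldl (fun reactions i2 =>
      (PySem.List.pyRange 0 nA 1).foldl (fun reactions j1 =>
        (PySem.List.pyRange j1 nA 1).foldl (fun reactions j2 =>
          (PySem.List.pyRange 0 nB 1).foldl (fun reactions k1 =>
            (PySem.List.pyRange k1 nB 1).foldl (fun reactions k2 =>
              reactions ++ pvLineA i1 i2 j1 j2 k1 k2) reactions) reactions) reactions) reactions) reactions) ""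

-- ===== PORT B =====
-- t = n * (n + 1) // 2
def pvTriI (n : Int) : Int := PySem.Int.floordiv (n * (n + 1)) 2

-- B's helper 'unrank(n, t, r)'; math.isqrt ported as Nat.sqrt (exact: its argument 8*rp+1 is
-- nonnegative at every call B makes)
def pvUnrank (n t r : Int) : Int × Int :=
  let rp := t - 1 - r
  let g := PySem.Int.floordiv ((Nat.sqrt (8 * rp + 1).toNat : Int) - 1) 2
  let off := rp - PySem.Int.floordiv (g * (g + 1)) 2
  (n - 1 - g, n - 1 - off)

-- the f-string B appends for one decoded index
def pvLineB (i1 i2 j1 j2 k1 k2 : Int) : String :=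
  "L_" ++ PySem.Int.toStr (i1+1) ++ " + L_" ++ PySem.Int.toStr (i2+1) ++ " + A_" ++
    PySem.Int.toStr (j1+1) ++ " + A_" ++ PySem.Int.toStr (j2+1) ++ " + " ++
  ("B_" ++ PySem.Int.toStr (k1+1) ++ " + B_" ++ PySem.Int.toStr (k2+1) ++ " <=> ") ++
  ("H_" ++ PySem.Int.toStr (i1+1) ++ "_" ++ PySem.Int.toStr (i2+1) ++ "_" ++ PySem.Int.toStr (j1+1)
    ++ "_" ++ PySem.Int.toStr (j2+1) ++ "_" ++ PySem.Int.toStr (k1+1) ++ "_" ++ PySem.Int.toStr (k2+1) ++ "\n")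

def make_reactions_onestep_hexameric_alt (model_size : Int × Int × Int) : String :=
  let nL := model_size.1
  let nA := model_size.2.1
  let nB := model_size.2.2
  if nL ≤ 0 ∨ nA ≤ 0 ∨ nB ≤ 0 then "" else
  let tL := pvTriI nL
  let tA := pvTriI nA
  let tB := pvTriI nB
  let out := (PySem.List.pyRange 0 (tL * tA * tB) 1).foldl (fun out m =>
    let p := pvUnrank nL tL (PySem.Int.floordiv m (tA * tB))
    let q := pvUnrank nA tA (PySem.Int.mod (PySem.Int.floordiv m tB) tA)
    let s := pvUnrank nB tB (PySem.Int.mod m tB)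
    out ++ [pvLineB p.1 p.2 q.1 q.2 s.1 s.2]) []
  String.join out

-- ===== PRECONDITION & SPEC =====
def Spec_make_reactions_onestep_hexameric (model_size : Int × Int × Int) (out : String) : Prop := out = make_reactions_onestep_hexameric_alt model_size
instance (model_size : Int × Int × Int) (out : String) : Decidable (Spec_make_reactions_onestep_hexameric model_size out) := by unfold Spec_make_reactions_onestep_hexameric; infer_instance

-- ===== CLAIM =====
def Claim_equal_make_reactions_onestep_hexameric : Prop := ∀ (model_size : Int × Int × Int), Dom_make_reactions_onestep_hexameric model_size → Spec_make_reactions_onestep_hexameric model_size (make_reactions_onestep_hexameric model_size)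

-- ===== LEMMAS AND PROOFS =====
theorem pv_join_cons (a : String) (l : List String) : String.join (a :: l) = a ++ String.join l := by
  simp [String.join]
  induction l generalizing a with
  | nil => simp
  | cons b t ih => simp [List.foldl, ih b, ih (a ++ b), String.append_assoc]

-- A's '+='-loops: a foldl that appends one string per element is the join of the mapped list
theorem pv_foldl_app {α : Type} (f : α → String) (l : List α) (s : String) :
    l.foldl (fun acc x => acc ++ f x) s = s ++ String.join (l.map f) := by
  induction l generalizing s with
  | nil => simp [String.join]
  | cons a t ih => simp [List.foldl, ih, pv_join_cons, String.append_assoc]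

theorem pv_pyRange_nonpos (n : Int) (h : n ≤ 0) : PySem.List.pyRange 0 n 1 = [] := by
  rw [PySem.List.pyRange_one]
  simp [h]

theorem pv_join_nil : String.join ([] : List String) = "" := rfl

theorem pv_join_flatMap {α : Type} (f : α → List String) (l : List α) :
    String.join (l.flatMap f) = String.join (l.map (fun x => String.join (f x))) := by
  induction l with
  | nil => rfl
  | cons a t ih =>
    simp only [List.flatMap_cons, List.map_cons, pv_join_cons]
    induction f a with
    | nil => simpa using ih
    | cons b u ih2 => simp [pv_join_cons, ih2, String.append_assoc]

-- B's append loop builds the mapped list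
theorem pv_foldl_append_singleton {α β : Type} (f : α → β) (l : List α) (s : List β) :
    l.foldl (fun acc x => acc ++ [f x]) s = s ++ l.map f := by
  induction l generalizing s with
  | nil => simp
  | cons a t ih => simp [List.foldl, ih]

-- ---- Nat-level combinatorics ----
def pvTriN (n : Nat) : Nat := n * (n + 1) / 2

def pvGN (rp : Nat) : Nat := (Nat.sqrt (8 * rp + 1) - 1) / 2

def pvDecN (n r : Nat) : Nat × Nat :=
  (n - 1 - pvGN (pvTriN n - 1 - r),
   n - 1 - ((pvTriN n - 1 - r) - pvTriN (pvGN (pvTriN n - 1 - r))))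

def pvPairsN (n : Nat) : List (Nat × Nat) :=
  (List.range n).flatMap (fun a => (List.range (n - a)).map (fun d => (a, a + d)))

theorem pv_two_triN (k : Nat) : 2 * pvTriN k = k * (k + 1) := by
  have h : 2 ∣ k * (k + 1) := (Nat.even_mul_succ_self k).two_dvd
  unfold pvTriN
  omega

theorem pv_triN_succ (k : Nat) : pvTriN (k + 1) = pvTriN k + (k + 1) := by
  have h1 := pv_two_triN k
  have h2 := pv_two_triN (k + 1)
  have h3 : (k + 1) * (k + 1 + 1) = k * (k + 1) + 2 * (k + 1) := by ring
  omega

theorem pv_triN_lt (a b : Nat) (h : a < b) : pvTriN a < pvTriN b := by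
  induction b with
  | zero => omega
  | succ b ih =>
    rw [pv_triN_succ]
    rcases Nat.lt_succ_iff_lt_or_eq.mp h with h' | h'
    · exact lt_trans (ih h') (by omega)
    · subst h'; omega

-- the two defining bounds of the unranking group
theorem pv_tri_gN_le (rp : Nat) : pvTriN (pvGN rp) ≤ rp := by
  set s := Nat.sqrt (8 * rp + 1) with hs
  have hsq : s * s ≤ 8 * rp + 1 := by
    have h := Nat.sqrt_le' (8 * rp + 1)
    simpa [pow_two] using h
  have hs1 : 1 ≤ s := by
    have : 0 < s := Nat.sqrt_pos.mpr (by omega)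
    omega
  set g := pvGN rp with hg
  have hgs : 2 * g + 1 ≤ s := by unfold pvGN at hg; omega
  have h1 : (2 * g + 1) * (2 * g + 1) ≤ s * s := Nat.mul_le_mul hgs hgs
  have h2 : (2 * g + 1) * (2 * g + 1) = 4 * (g * (g + 1)) + 1 := by ring
  have h3 := pv_two_triN g
  omega

theorem pv_lt_tri_gN_succ (rp : Nat) : rp < pvTriN (pvGN rp + 1) := by
  set s := Nat.sqrt (8 * rp + 1) with hs
  have hsq : 8 * rp + 1 < (s + 1) * (s + 1) := by
    have h := Nat.lt_succ_sqrt' (8 * rp + 1)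
    simpa [pow_two, Nat.succ_eq_add_one] using h
  have hs1 : 1 ≤ s := by
    have : 0 < s := Nat.sqrt_pos.mpr (by omega)
    omega
  set g := pvGN rp with hg
  have hgs : s ≤ 2 * g + 2 := by unfold pvGN at hg; omega
  have h1 : (s + 1) * (s + 1) ≤ (2 * g + 3) * (2 * g + 3) := Nat.mul_le_mul (by omega) (by omega)
  have h2 : (2 * g + 3) * (2 * g + 3) = 4 * ((g + 1) * (g + 2)) + 1 := by ring
  have h3 := pv_two_triN (g + 1)
  have h4 : (g + 1) * (g + 1 + 1) = (g + 1) * (g + 2) := by ring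
  omega

theorem pv_gN_lt (rp n : Nat) (h : rp < pvTriN n) : pvGN rp < n := by
  by_contra hc
  have := pv_tri_gN_le rp
  have : pvTriN n ≤ pvTriN (pvGN rp) := by
    rcases Nat.lt_or_ge n (pvGN rp) with h' | h'
    · exact le_of_lt (pv_triN_lt _ _ h')
    · have : n = pvGN rp := by omega
      rw [this]
  omega

theorem pv_gN_ge (rp n : Nat) (h : pvTriN n ≤ rp) : n ≤ pvGN rp := by
  by_contra hc
  have h2 := pv_lt_tri_gN_succ rp
  have : pvTriN (pvGN rp + 1) ≤ pvTriN n := by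
    rcases Nat.lt_or_ge (pvGN rp + 1) n with h' | h'
    · exact le_of_lt (pv_triN_lt _ _ h')
    · have : pvGN rp + 1 = n := by omega
      rw [this]
  omega

theorem pv_decN_lt (n r : Nat) (hr : r < n + 1) :
    pvDecN (n + 1) r = (0, r) := by
  have htr := pv_triN_succ n
  have hrp : pvTriN (n + 1) - 1 - r = pvTriN n + (n - r) := by omega
  have hle : pvTriN n ≤ pvTriN n + (n - r) := by omega
  have hlt : pvTriN n + (n - r) < pvTriN (n + 1) := by omega
  have hg : pvGN (pvTriN n + (n - r)) = n := by
    have h1 := pv_gN_ge (pvTriN n + (n - r)) n hle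
    have h2 := pv_gN_lt (pvTriN n + (n - r)) (n + 1) hlt
    omega
  unfold pvDecN
  rw [hrp, hg]
  simp only [Prod.mk.injEq]
  constructor <;> omega

theorem pv_decN_ge (n r : Nat) (hr : r < pvTriN n) :
    pvDecN (n + 1) (n + 1 + r) = ((pvDecN n r).1 + 1, (pvDecN n r).2 + 1) := by
  have htr := pv_triN_succ n
  have hrp : pvTriN (n + 1) - 1 - (n + 1 + r) = pvTriN n - 1 - r := by omega
  set rp := pvTriN n - 1 - r with hrpdef
  have hrpb : rp < pvTriN n := by
    have : 0 < pvTriN n := by omega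
    omega
  have hglt : pvGN rp < n := by
    -- rp ≤ pvTriN n - 1 - 0 and r ≥ 0; in fact rp < pvTriN n, but we need < n when n ≥ 1:
    -- rp = pvTriN n - 1 - r and since n+1+r forces nothing more, use rp < pvTriN n
    exact pv_gN_lt rp n hrpb
  have hoff : rp - pvTriN (pvGN rp) ≤ pvGN rp := by
    have h1 := pv_tri_gN_le rp
    have h2 := pv_lt_tri_gN_succ rp
    have h3 := pv_triN_succ (pvGN rp)
    omega
  unfold pvDecN
  rw [hrp, ← hrpdef]
  simp only [Prod.mk.injEq]
  constructor <;> omega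

theorem pv_pairsN_succ (n : Nat) :
    pvPairsN (n + 1) =
      (List.range (n + 1)).map (fun d => ((0 : Nat), d)) ++
      (pvPairsN n).map (fun p => (p.1 + 1, p.2 + 1)) := by
  unfold pvPairsN
  rw [List.range_succ_eq_map, List.flatMap_cons]
  congr 1
  · simp [← List.range_succ_eq_map]
  rw [List.flatMap_map, List.map_flatMap]
  refine List.flatMap_congr (fun a _ => ?_)
  rw [List.map_map, Nat.succ_sub_succ]
  exact List.map_congr_left (fun d _ => by
    simp only [Function.comp_apply]
    rw [Nat.add_right_comm])

theorem pv_coreL (n : Nat) :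
    (List.range (pvTriN n)).map (pvDecN n) = pvPairsN n := by
  induction n with
  | zero => rfl
  | succ n ih =>
    have ht : pvTriN (n + 1) = (n + 1) + pvTriN n := by
      have := pv_triN_succ n; omega
    rw [ht, List.range_add, List.map_append, pv_pairsN_succ, ← ih, List.map_map]
    congr 1
    · exact List.map_congr_left (fun r hr => pv_decN_lt n r (List.mem_range.mp hr))
    · rw [List.map_map]
      exact List.map_congr_left (fun r hr => by
        have h := pv_decN_ge n r (List.mem_range.mp hr)
        simp [h])

-- splitting range (x*y) by divmod
theorem pv_map_range_mul {α : Type} (x y : Nat) (hy : 0 < y) (f : Nat → Nat → α) :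
    (List.range (x * y)).map (fun m => f (m / y) (m % y)) =
      (List.range x).flatMap (fun i => (List.range y).map (fun j => f i j)) := by
  induction x with
  | zero => simp
  | succ x ih =>
    have hx : (x + 1) * y = x * y + y := by ring
    rw [hx, List.range_add, List.map_append, ih, List.range_succ, List.flatMap_append]
    congr 1
    simp only [List.flatMap_cons, List.flatMap_nil, List.append_nil, List.map_map]
    exact List.map_congr_left (fun j hj => by
      have hjy := List.mem_range.mp hj
      have hc : x * y + j = y * x + j := by ring
      have h1 : (x * y + j) / y = x := by
        rw [hc, Nat.mul_add_div hy, Nat.div_eq_of_lt hjy]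
        omega
      have h2 : (x * y + j) % y = j := by
        rw [hc, Nat.mul_add_mod, Nat.mod_eq_of_lt hjy]
      simp [h1, h2])

-- triple divmod split
theorem pv_triple_split {α : Type} (X Y Z : Nat) (hY : 0 < Y) (hZ : 0 < Z) (f : Nat → Nat → Nat → α) :
    (List.range (X * Y * Z)).map (fun m => f (m / (Y * Z)) (m / Z % Y) (m % Z)) =
      (List.range X).flatMap (fun i => (List.range Y).flatMap (fun j =>
        (List.range Z).map (fun k => f i j k))) := by
  have hYZ : 0 < Y * Z := Nat.mul_pos hY hZ
  have step1 : (List.range (X * Y * Z)).map (fun m => f (m / (Y * Z)) (m / Z % Y) (m % Z)) =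
      (List.range (X * (Y * Z))).map (fun m => f (m / (Y * Z)) (m % (Y * Z) / Z) (m % (Y * Z) % Z)) := by
    rw [Nat.mul_assoc]
    refine List.map_congr_left (fun m _ => ?_)
    have hdvd : Z ∣ Y * Z := dvd_mul_left Z Y
    have i2 : m % (Y * Z) % Z = m % Z := Nat.mod_mod_of_dvd m hdvd
    have i1 : m % (Y * Z) / Z = m / Z % Y := by
      rw [Nat.mul_comm Y Z]
      exact Nat.mod_mul_right_div_self m Z Y
    rw [i1, i2]
  rw [step1, pv_map_range_mul X (Y * Z) hYZ (fun i q => f i (q / Z) (q % Z))]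
  refine List.flatMap_congr (fun i _ => ?_)
  exact pv_map_range_mul Y Z hZ (fun j k => f i j k)

-- fold the decode through a range into the pair list
theorem pv_flatMap_dec {α : Type} (n : Nat) (H : Nat × Nat → List α) :
    (List.range (pvTriN n)).flatMap (fun r => H (pvDecN n r)) = (pvPairsN n).flatMap H := by
  rw [← pv_coreL n]
  exact (List.flatMap_map (pvDecN n) H (List.range (pvTriN n))).symm

theorem pv_map_dec {α : Type} (n : Nat) (F : Nat × Nat → α) :
    (List.range (pvTriN n)).map (fun r => F (pvDecN n r)) = (pvPairsN n).map F := by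
  rw [← pv_coreL n, List.map_map]
  rfl

-- the pair list unfolded back into nested ranges
theorem pv_flatMap_pairs {α : Type} (n : Nat) (H : Nat × Nat → List α) :
    (pvPairsN n).flatMap H =
      (List.range n).flatMap (fun a => (List.range (n - a)).flatMap (fun d => H (a, a + d))) := by
  unfold pvPairsN
  simp only [List.flatMap_assoc, List.flatMap_map]

theorem pv_map_pairs {α : Type} (n : Nat) (F : Nat × Nat → α) :
    (pvPairsN n).map F =
      (List.range n).flatMap (fun a => (List.range (n - a)).map (fun d => F (a, a + d))) := by
  unfold pvPairsN
  simp only [List.map_flatMap, List.map_map]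
  rfl

-- the two f-strings build the same line
theorem pv_line_eq (i1 i2 j1 j2 k1 k2 : Int) :
    pvLineA i1 i2 j1 j2 k1 k2 = pvLineB i1 i2 j1 j2 k1 k2 := by
  have merge : ∀ X : String, " + " ++ ("A_" ++ X) = " + A_" ++ X := fun X => by
    rw [← String.append_assoc]
    congr 1
  unfold pvLineA pvLineB
  simp only [String.append_assoc, merge]

-- ---- cast bridges ----
theorem pv_triI_cast (N : Nat) : pvTriI (N : Int) = (pvTriN N : Int) := by
  unfold pvTriI pvTriN
  have : ((N : Int) * ((N : Int) + 1)) = ((N * (N + 1) : Nat) : Int) := by push_cast; ring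
  rw [this]
  exact_mod_cast PySem.Int.floordiv_natCast (N * (N + 1)) 2

theorem pv_unrank_cast (N r : Nat) (hr : r < pvTriN N) :
    pvUnrank (N : Int) ((pvTriN N : Nat) : Int) (r : Int) =
      (((pvDecN N r).1 : Int), ((pvDecN N r).2 : Int)) := by
  have hfd : ∀ a : Int, PySem.Int.floordiv a 2 = a / 2 := fun a =>
    PySem.Int.floordiv_eq_ediv_of_pos (by norm_num)
  simp only [pvUnrank, hfd]
  have hrp : ((pvTriN N : Nat) : Int) - 1 - (r : Int) = ((pvTriN N - 1 - r : Nat) : Int) := by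
    omega
  rw [hrp]
  set rpN := pvTriN N - 1 - r with hrpN
  have hrpb : rpN < pvTriN N := by omega
  have h8 : (8 * ((rpN : Nat) : Int) + 1).toNat = 8 * rpN + 1 := by omega
  rw [h8]
  set s := Nat.sqrt (8 * rpN + 1) with hs
  have hs1 : 1 ≤ s := by
    have : 0 < s := Nat.sqrt_pos.mpr (by omega)
    omega
  have hgdef : pvGN rpN = (s - 1) / 2 := by unfold pvGN; rw [← hs]
  have hg : ((s : Int) - 1) / 2 = ((pvGN rpN : Nat) : Int) := by rw [hgdef]; omega
  rw [hg]
  have hp : ((pvGN rpN : Nat) : Int) * (((pvGN rpN : Nat) : Int) + 1) =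
      ((pvGN rpN * (pvGN rpN + 1) : Nat) : Int) := by push_cast; ring
  rw [hp]
  have h2t := pv_two_triN (pvGN rpN)
  have hq : ((pvGN rpN * (pvGN rpN + 1) : Nat) : Int) / 2 = ((pvTriN (pvGN rpN) : Nat) : Int) := by
    omega
  rw [hq]
  have hglt : pvGN rpN < N := pv_gN_lt rpN N hrpb
  have htle := pv_tri_gN_le rpN
  have hts := pv_lt_tri_gN_succ rpN
  have htsucc := pv_triN_succ (pvGN rpN)
  unfold pvDecN
  rw [← hrpN]
  simp only [Prod.mk.injEq]
  constructor <;> omega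

theorem pv_join_replicate (n : Nat) : String.join (List.replicate n "") = "" := by
  induction n with
  | zero => rfl
  | succ k ih => rw [List.replicate_succ, pv_join_cons, ih]; rfl

-- canonical form shared by the two reductions
def pvInner (pL pA pB : Nat × Nat) : String :=
  pvLineB (pL.1 : Int) (pL.2 : Int) (pA.1 : Int) (pA.2 : Int) (pB.1 : Int) (pB.2 : Int)

def pvMid (B : Nat) (pL pA : Nat × Nat) : List String := (pvPairsN B).map (pvInner pL pA)

def pvOuter (A B : Nat) (pL : Nat × Nat) : List String := (pvPairsN A).flatMap (pvMid B pL)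

def pvCanon (L A B : Nat) : List String := (pvPairsN L).flatMap (pvOuter A B)

theorem pv_B_core (L A B : Nat) :
    (List.range (pvTriN L)).flatMap (fun i => (List.range (pvTriN A)).flatMap (fun j =>
      (List.range (pvTriN B)).map (fun k =>
        pvInner (pvDecN L i) (pvDecN A j) (pvDecN B k)))) = pvCanon L A B := by
  unfold pvCanon
  rw [← pv_flatMap_dec L (pvOuter A B)]
  refine List.flatMap_congr (fun i _ => ?_)
  unfold pvOuter
  rw [← pv_flatMap_dec A (pvMid B (pvDecN L i))]
  refine List.flatMap_congr (fun j _ => ?_)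
  unfold pvMid
  rw [← pv_map_dec B (pvInner (pvDecN L i) (pvDecN A j))]

theorem pv_A_core (L A B : Nat) :
    pvCanon L A B =
      (List.range L).flatMap (fun a => (List.range (L - a)).flatMap (fun d =>
        (List.range A).flatMap (fun a' => (List.range (A - a')).flatMap (fun d' =>
          (List.range B).flatMap (fun a'' => (List.range (B - a'')).map (fun d'' =>
            pvInner (a, a + d) (a', a' + d') (a'', a'' + d''))))))) := by
  unfold pvCanon
  rw [pv_flatMap_pairs L (pvOuter A B)]
  refine List.flatMap_congr (fun a _ => ?_)
  refine List.flatMap_congr (fun d _ => ?_)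
  unfold pvOuter
  rw [pv_flatMap_pairs A (pvMid B (a, a + d))]
  refine List.flatMap_congr (fun a' _ => ?_)
  refine List.flatMap_congr (fun d' _ => ?_)
  unfold pvMid
  rw [pv_map_pairs B (pvInner (a, a + d) (a', a' + d'))]

theorem pv_A_eq (L A B : Nat) :
    make_reactions_onestep_hexameric ((L : Int), (A : Int), (B : Int)) =
      String.join (pvCanon L A B) := by
  unfold make_reactions_onestep_hexameric
  simp only [pv_foldl_app, String.empty_append, ← pv_join_flatMap]
  congr 1
  rw [pv_A_core]
  simp only [PySem.List.pyRange_one, List.flatMap_map, List.map_map, zero_add,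
    Int.toNat_sub]
  refine List.flatMap_congr (fun a _ => ?_)
  refine List.flatMap_congr (fun d _ => ?_)
  refine List.flatMap_congr (fun a' _ => ?_)
  refine List.flatMap_congr (fun d' _ => ?_)
  refine List.flatMap_congr (fun a'' _ => ?_)
  refine List.map_congr_left (fun d'' _ => ?_)
  simp only [Function.comp_apply]
  rw [pv_line_eq]
  simp [pvInner, Nat.cast_add]

theorem pv_B_eq (L A B : Nat) (hL : 0 < L) (hA : 0 < A) (hB : 0 < B) :
    make_reactions_onestep_hexameric_alt ((L : Int), (A : Int), (B : Int)) =
      String.join (pvCanon L A B) := by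
  have hTL : 0 < pvTriN L := by
    have h := pv_triN_lt 0 L hL
    simpa [pvTriN] using h
  have hTA : 0 < pvTriN A := by
    have h := pv_triN_lt 0 A hA
    simpa [pvTriN] using h
  have hTB : 0 < pvTriN B := by
    have h := pv_triN_lt 0 B hB
    simpa [pvTriN] using h
  unfold make_reactions_onestep_hexameric_alt
  rw [if_neg (by push Not; exact ⟨by simpa using hL, by simpa using hA, by simpa using hB⟩)]
  simp only [pv_triI_cast]
  rw [show ((pvTriN L : Nat) : Int) * ((pvTriN A : Nat) : Int) * ((pvTriN B : Nat) : Int) =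
      ((pvTriN L * pvTriN A * pvTriN B : Nat) : Int) from by push_cast; ring]
  rw [PySem.List.pyRange_one]
  simp only [Int.sub_zero, Int.toNat_natCast, pv_foldl_append_singleton, List.nil_append,
    List.map_map]
  congr 1
  rw [← pv_B_core L A B,
    ← pv_triple_split (pvTriN L) (pvTriN A) (pvTriN B) hTA hTB
      (fun i j k => pvInner (pvDecN L i) (pvDecN A j) (pvDecN B k))]
  refine List.map_congr_left (fun m hm => ?_)
  have hmP : m < pvTriN L * pvTriN A * pvTriN B := List.mem_range.mp hm
  have hAB : ((pvTriN A : Nat) : Int) * ((pvTriN B : Nat) : Int) =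
      ((pvTriN A * pvTriN B : Nat) : Int) := by push_cast; ring
  simp only [Function.comp_apply, zero_add, hAB, PySem.Int.floordiv_natCast,
    PySem.Int.mod_natCast]
  have b1 : m / (pvTriN A * pvTriN B) < pvTriN L := by
    rw [Nat.div_lt_iff_lt_mul (Nat.mul_pos hTA hTB)]
    calc m < pvTriN L * pvTriN A * pvTriN B := hmP
    _ = pvTriN L * (pvTriN A * pvTriN B) := by ring
  have b2 : m / pvTriN B % pvTriN A < pvTriN A := Nat.mod_lt _ hTA
  have b3 : m % pvTriN B < pvTriN B := Nat.mod_lt _ hTB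
  rw [pv_unrank_cast L _ b1, pv_unrank_cast A _ b2, pv_unrank_cast B _ b3]
  rfl

-- ===== VERDICT =====
theorem make_reactions_onestep_hexameric_spec : Claim_equal_make_reactions_onestep_hexameric := by
  intro ms _
  unfold Spec_make_reactions_onestep_hexameric
  obtain ⟨nL, nA, nB⟩ := ms
  by_cases hdeg : nL ≤ 0 ∨ nA ≤ 0 ∨ nB ≤ 0
  · simp only [make_reactions_onestep_hexameric, make_reactions_onestep_hexameric_alt,
      pv_foldl_app, String.empty_append, if_pos hdeg]
    rcases hdeg with h | h | h
    · simp [pv_pyRange_nonpos _ h, pv_join_nil]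
    · simp [pv_pyRange_nonpos _ h, List.map_const', pv_join_replicate, pv_join_nil]
    · simp [pv_pyRange_nonpos _ h, List.map_const', pv_join_replicate, pv_join_nil]
  · push Not at hdeg
    obtain ⟨hL0, hA0, hB0⟩ := hdeg
    obtain ⟨L, rfl⟩ : ∃ n : Nat, nL = (n : Int) := ⟨nL.toNat, (Int.toNat_of_nonneg (by omega)).symm⟩
    obtain ⟨A, rfl⟩ : ∃ n : Nat, nA = (n : Int) := ⟨nA.toNat, (Int.toNat_of_nonneg (by omega)).symm⟩
    obtain ⟨B, rfl⟩ : ∃ n : Nat, nB = (n : Int) := ⟨nB.toNat, (Int.toNat_of_nonneg (by omega)).symm⟩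
    have hL : 0 < L := by exact_mod_cast hL0
    have hA : 0 < A := by exact_mod_cast hA0
    have hB : 0 < B := by exact_mod_cast hB0
    exact (pv_A_eq L A B).trans (pv_B_eq L A B hL hA hB).symm
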